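-- pv_equiv track=rewrite | github.com/daniyyelfelipe/pyDrawMusic | data/turtlePaterns.py | set_note_position_x
-- ===== SOURCE A (Python) =====
-- def set_note_position_x(note_position):
-- 	"""Set the note x position"""
--
-- 	# Default fist position
-- 	note_position_1_x = -280
--
-- 	if(note_position > 1):
-- 		for i in range(note_position - 1):
-- 			note_position_1_x = note_position_1_x + 30
--
-- 		return note_position_1_x
-- 	else:
-- 		return note_position_1_x
-- ===== SOURCE B (Python) =====
-- def set_note_position_x(note_position):
--     """Set the note x position"""
--     if note_position > 1:
--         return -280 + 30 * (note_position - 1)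
--     return -280
-- ===== Notes on version B (the rewrite author's own statement) =====
-- stated objective: simpler
-- what changed: Replaced the accumulator loop over range(note_position - 1) with the closed-form expression -280 + 30*(note_position - 1), keeping the > 1 guard.
import Mathlib
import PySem

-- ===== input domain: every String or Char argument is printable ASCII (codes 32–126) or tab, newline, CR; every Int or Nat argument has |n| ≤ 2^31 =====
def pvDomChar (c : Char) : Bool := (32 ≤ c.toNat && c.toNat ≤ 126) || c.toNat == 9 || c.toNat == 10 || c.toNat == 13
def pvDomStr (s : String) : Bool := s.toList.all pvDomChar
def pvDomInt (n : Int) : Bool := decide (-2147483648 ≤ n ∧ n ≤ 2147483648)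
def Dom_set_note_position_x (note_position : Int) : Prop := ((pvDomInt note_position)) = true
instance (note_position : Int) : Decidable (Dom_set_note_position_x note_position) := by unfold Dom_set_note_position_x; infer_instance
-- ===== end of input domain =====

-- B replaces A's add-30 accumulator loop with a closed-form expression (simpler, O(1)).

-- ===== PORT A =====
def set_note_position_x (note_position : Int) : Int :=
  let note_position_1_x : Int := -280
  if note_position > 1 then
    (PySem.List.pyRange 0 (note_position - 1) 1).foldl
      (fun acc _ => acc + 30) note_position_1_x
  else
    note_position_1_x

-- ===== PORT B =====
def set_note_position_x_alt (note_position : Int) : Int :=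
  if note_position > 1 then -280 + 30 * (note_position - 1) else -280

-- ===== PRECONDITION & SPEC =====
def Spec_set_note_position_x (note_position : Int) (out : Int) : Prop := out = set_note_position_x_alt note_position
instance (note_position : Int) (out : Int) : Decidable (Spec_set_note_position_x note_position out) := by unfold Spec_set_note_position_x; infer_instance

-- ===== CLAIM (what is proved, stated in full; the proofs are below) =====
def Claim_equal_set_note_position_x : Prop := ∀ (note_position : Int), Dom_set_note_position_x note_position → Spec_set_note_position_x note_position (set_note_position_x note_position)

-- ===== LEMMAS AND PROOFS =====

-- A's loop adds 30 once per list element, regardless of the element's value.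
theorem foldl_add30 (l : List Int) (x : Int) :
    l.foldl (fun acc _ => acc + 30) x = x + 30 * l.length := by
  induction l generalizing x with
  | nil => simp
  | cons h t ih => simp [List.foldl, ih]; ring

-- ===== VERDICT (by name: the statement is the Claim_ definition above) =====
theorem set_note_position_x_spec : Claim_equal_set_note_position_x := by
  intro n _
  unfold Spec_set_note_position_x set_note_position_x set_note_position_x_alt
  by_cases h : n > 1
  · simp only [h, if_pos]
    rw [foldl_add30, PySem.List.length_pyRange_one]
    push_cast [Int.toNat_sub_of_le (by omega : (0:Int) ≤ n - 1)]
    omega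
  · simp [h]
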